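-- pv_equiv track=rewrite | github.com/pig-games/asm485 | documentation/45gs02/extract_anchor_lines_v0_1.py | find_first_line_numbers
-- ===== SOURCE A (Python) =====
-- PATTERNS = {
--     "appendix_k": "45GS02 Microprocessor",
--     "appendix_l": "45GS02 & 6502 Instruction Sets",
--     "instruction_set_4510": "4510 INSTRUCTION SET",
--     "opcode_table_4510_45gs02": "Opcode T able 4510/45GS02",
--     "compound_instructions": "45GS02 COMPOUND INSTRUCTIONS",
-- }
--
-- def find_first_line_numbers(text: str) -> dict[str, int]:
--     result: dict[str, int] = {}
--     lines = text.splitlines()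
--     for key, needle in PATTERNS.items():
--         for index, line in enumerate(lines, start=1):
--             if needle in line:
--                 result[key] = index
--                 break
--     return result
-- ===== SOURCE B (Python) =====
-- PATTERNS = {
--     "appendix_k": "45GS02 Microprocessor",
--     "appendix_l": "45GS02 & 6502 Instruction Sets",
--     "instruction_set_4510": "4510 INSTRUCTION SET",
--     "opcode_table_4510_45gs02": "Opcode T able 4510/45GS02",
--     "compound_instructions": "45GS02 COMPOUND INSTRUCTIONS",
-- }
--
-- def find_first_line_numbers(text: str) -> dict[str, int]:
--     patterns = list(PATTERNS.items())
--     firsts = [None] * len(patterns)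
--     for index, line in enumerate(text.splitlines(), start=1):
--         firsts = [index if first is None and needle in line else first
--                   for (_, needle), first in zip(patterns, firsts)]
--     return {key: first for (key, _), first in zip(patterns, firsts)
--             if first is not None}
-- ===== Notes on version B (the rewrite author's own statement) =====
-- stated objective: alternative
-- what changed: A scans the full line list once per pattern (pattern-outer loop with break); B makes a single pass over the enumerated lines maintaining a parallel table of first-hit line numbers for all patterns at once, then emits the found entries in pattern order.
import Mathlib
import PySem

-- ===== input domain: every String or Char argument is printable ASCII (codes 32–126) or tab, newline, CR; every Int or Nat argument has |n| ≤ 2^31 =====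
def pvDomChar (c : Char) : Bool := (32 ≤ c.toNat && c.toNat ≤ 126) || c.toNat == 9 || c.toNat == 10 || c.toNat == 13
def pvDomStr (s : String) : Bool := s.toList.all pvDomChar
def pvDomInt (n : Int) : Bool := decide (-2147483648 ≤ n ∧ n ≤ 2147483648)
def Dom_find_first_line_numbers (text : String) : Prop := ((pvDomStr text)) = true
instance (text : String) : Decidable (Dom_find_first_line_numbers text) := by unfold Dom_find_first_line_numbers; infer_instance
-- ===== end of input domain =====

-- B replaces A's pattern-outer/lines-inner double scan (one full pass over the lines per
-- pattern) by a single pass over the lines that maintains a parallel table of first-hit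
-- line numbers, one per pattern; objective: alternative (same asymptotic cost).

-- ===== PORT A =====
def pvPATTERNS : List (String × String) :=
  [("appendix_k", "45GS02 Microprocessor"),
   ("appendix_l", "45GS02 & 6502 Instruction Sets"),
   ("instruction_set_4510", "4510 INSTRUCTION SET"),
   ("opcode_table_4510_45gs02", "Opcode T able 4510/45GS02"),
   ("compound_instructions", "45GS02 COMPOUND INSTRUCTIONS")]

-- 'for index, line in enumerate(lines, 1): if needle in line: … break' as structural recursion
def pvScanA (needle : String) (lines : List String) (index : Int) : Option Int :=
  match lines with
  | [] => none
  | l :: ls => if PySem.Str.isIn needle l then some index else pvScanA needle ls (index + 1)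

def find_first_line_numbers (text : String) : List (String × Int) :=
  let lines := PySem.Str.splitlines text
  (pvPATTERNS.foldl (fun (result : PySem.Dict String Int) kv =>
      match pvScanA kv.2 lines 1 with
      | some i => result.insert kv.1 i
      | none => result) PySem.Dict.empty).items

-- ===== PORT B =====
-- 'index if first is None and needle in line else first'
def pvUpd (needle : String) (index : Int) (line : String) (o : Option Int) : Option Int :=
  if o = none ∧ PySem.Str.isIn needle line then some index else o

def find_first_line_numbers_alt (text : String) : List (String × Int) :=
  let firsts0 : List (Option Int) := pvPATTERNS.map (fun _ => none)
  let firsts := (PySem.List.enumerate (PySem.Str.splitlines text) 1).foldl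
      (fun fs il => (pvPATTERNS.zip fs).map (fun p => pvUpd p.1.2 il.1 il.2 p.2)) firsts0
  (pvPATTERNS.zip firsts).filterMap (fun p => p.2.map (fun i => (p.1.1, i)))

-- ===== PRECONDITION & SPEC =====
def Spec_find_first_line_numbers (text : String) (out : List (String × Int)) : Prop := out = find_first_line_numbers_alt text
instance (text : String) (out : List (String × Int)) : Decidable (Spec_find_first_line_numbers text out) := by unfold Spec_find_first_line_numbers; infer_instance

-- ===== CLAIM (what is proved, stated in full; the proofs are below) =====
def Claim_equal_find_first_line_numbers : Prop := ∀ (text : String), Dom_find_first_line_numbers text → Spec_find_first_line_numbers text (find_first_line_numbers text)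

-- ===== LEMMAS AND PROOFS =====

-- zip of a list with a map over its own zip, entrywise
theorem pv_zip_map_zip {α β : Type} (g : α × β → β) :
    ∀ (pats : List α) (fs : List β),
      pats.zip ((pats.zip fs).map g) = (pats.zip fs).map (fun p => (p.1, g p)) := by
  intro pats
  induction pats with
  | nil => intro fs; simp
  | cons a pats ih =>
    intro fs
    cases fs with
    | nil => simp
    | cons f fs => simp [ih]

-- a fold over lines of an entrywise map = entrywise folds
theorem pv_foldl_map_zip {α β γ : Type} (u : α → γ → β → β) :
    ∀ (L : List γ) (pats : List α) (fs : List β), fs.length = pats.length →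
      L.foldl (fun fs c => (pats.zip fs).map (fun p => u p.1 c p.2)) fs
        = (pats.zip fs).map (fun p => L.foldl (fun o c => u p.1 c o) p.2) := by
  intro L
  induction L with
  | nil =>
    intro pats fs h
    have h2 := List.map_snd_zip (l₁ := pats) (l₂ := fs) (by omega)
    simpa using h2.symm
  | cons c L ih =>
    intro pats fs h
    have hlen : ((pats.zip fs).map (fun p => u p.1 c p.2)).length = pats.length := by
      simp [List.length_zip, h]
    simp only [List.foldl_cons]
    rw [ih pats _ hlen, pv_zip_map_zip, List.map_map]
    rfl

-- zip of a list with a map of itself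
theorem pv_zip_map_self {α β : Type} (f : α → β) :
    ∀ (l : List α), l.zip (l.map f) = l.map (fun a => (a, f a)) := by
  intro l
  induction l with
  | nil => rfl
  | cons a l ih => simp [ih]

-- once found, the table entry never changes
theorem pv_upd_some (n : String) (j : Int) :
    ∀ (L : List (Int × String)), L.foldl (fun o c => pvUpd n c.1 c.2 o) (some j) = some j := by
  intro L
  induction L with
  | nil => rfl
  | cons c L ih =>
    rw [List.foldl_cons]
    have h : pvUpd n c.1 c.2 (some j) = some j := by simp [pvUpd]
    rw [h, ih]

-- an unfound entry ends up at A's first-match scan result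
theorem pv_upd_none (n : String) :
    ∀ (lines : List String) (i : Int),
      (PySem.List.enumerate lines i).foldl (fun o c => pvUpd n c.1 c.2 o) none
        = pvScanA n lines i := by
  intro lines
  induction lines with
  | nil => intro i; rfl
  | cons l ls ih =>
    intro i
    rw [PySem.List.enumerate_cons, List.foldl_cons]
    by_cases hin : PySem.Str.isIn n l = true
    · have h1 : pvUpd n (i, l).1 (i, l).2 none = some i := by simp [pvUpd]; simpa using hin
      rw [h1, pv_upd_some]
      simp only [pvScanA]
      rw [if_pos hin]
    · have h1 : pvUpd n (i, l).1 (i, l).2 none = none := by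
        simp only [pvUpd]
        rw [if_neg]
        simp only [not_and]
        intro _
        simpa using hin
      rw [h1, ih]
      simp only [pvScanA]
      rw [if_neg hin]

-- A's fold over fresh distinct keys, as a filterMap
theorem pv_foldA (f : String → Option Int) :
    ∀ (pats : List (String × String)) (d : PySem.Dict String Int),
      (∀ kv ∈ pats, d.contains kv.1 = false) → (pats.map Prod.fst).Nodup →
      (pats.foldl (fun d kv =>
          match f kv.2 with
          | some i => d.insert kv.1 i
          | none => d) d).items
        = d.items ++ pats.filterMap (fun kv => (f kv.2).map (fun i => (kv.1, i))) := by
  intro pats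
  induction pats with
  | nil => intro d _ _; simp
  | cons kv pats ih =>
    intro d hfresh hnd
    simp only [List.map_cons, List.nodup_cons] at hnd
    cases hf : f kv.2 with
    | none =>
      simp only [List.foldl_cons, hf]
      rw [ih d (fun p hp => hfresh p (List.mem_cons_of_mem _ hp)) hnd.2]
      simp [hf]
    | some i =>
      simp only [List.foldl_cons, hf]
      have hfree : ∀ p ∈ pats, (d.insert kv.1 i).contains p.1 = false := by
        intro p hp
        rw [PySem.Dict.contains_insert]
        have h1 : (p.1 == kv.1) = false := by
          simp only [beq_eq_false_iff_ne, ne_eq]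
          intro he
          exact hnd.1 (he ▸ List.mem_map_of_mem hp)
        simp [h1, hfresh p (List.mem_cons_of_mem _ hp)]
      rw [ih _ hfree hnd.2,
          PySem.Dict.items_insert_of_not_contains _ _ (hfresh kv (List.mem_cons_self))]
      simp [hf]

-- ===== VERDICT (by name: the statement is the Claim_ definition above) =====
theorem find_first_line_numbers_spec : Claim_equal_find_first_line_numbers := by
  intro text _
  unfold Spec_find_first_line_numbers
  simp only [find_first_line_numbers, find_first_line_numbers_alt]
  rw [pv_foldA (fun n => pvScanA n (PySem.Str.splitlines text) 1) pvPATTERNS PySem.Dict.empty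
        (by intro kv _; simp) (by decide)]
  rw [pv_foldl_map_zip (fun (a : String × String) (c : Int × String) o => pvUpd a.2 c.1 c.2 o)
        (PySem.List.enumerate (PySem.Str.splitlines text) 1) pvPATTERNS
        (pvPATTERNS.map (fun _ => none)) (by simp)]
  rw [pv_zip_map_self, List.map_map, pv_zip_map_self, List.filterMap_map]
  have he : (PySem.Dict.empty : PySem.Dict String Int).items = [] := rfl
  simp [pv_upd_none, he]
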